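-- pv_equiv track=rewrite | github.com/M-Pidlisnyi/EVO_compass | task1.py | direction
-- ===== SOURCE A (Python) =====
-- def direction(facing, turn):
--     compass = {
--         'N':  0,
--         'NE': 45,
--         'E':  90,
--         'SE': 135,
--         'S':  180,
--         'SW': 225,
--         'W':  270,
--         'NW': 315,
--     }
--
--     current_turn = 0
--     try:
--         current_turn = compass[facing]
--     except KeyError:
--         return(f"Wrong direction: {facing}; NO Such Direction Exists")
--
--     if -1080 > turn or turn > 1080 or turn%45 != 0:
--         return(f"Wrong turning degree: {turn}; Degree must be between (-1080; 1080) and be multiple of 45")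
--
--     new_turn = current_turn + turn
--     while new_turn < 0:
--         new_turn += 360
--     while new_turn >= 360:
--         new_turn -= 360
--
--     try:
--         new_direction = list(compass.keys())[list(compass.values()).index(new_turn)]
--     except ValueError:
--         return(f"{new_turn} is not possible result; no direction with such degree exists")
--
--     return new_direction
-- ===== SOURCE B (Python) =====
-- def direction(facing, turn):
--     dirs = ['N', 'NE', 'E', 'SE', 'S', 'SW', 'W', 'NW']
--     try:
--         idx = dirs.index(facing)
--     except ValueError:
--         return f"Wrong direction: {facing}; NO Such Direction Exists"
--     if -1080 > turn or turn > 1080 or turn % 45 != 0: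
--         return f"Wrong turning degree: {turn}; Degree must be between (-1080; 1080) and be multiple of 45"
--     return dirs[(idx + turn // 45) % 8]
-- ===== Notes on version B (the rewrite author's own statement) =====
-- stated objective: simpler
-- what changed: Replaces the dict plus two while-loop normalizations plus a reverse value-search (list(keys)[list(values).index(...)]) by a single ordered direction list: position lookup via list.index, and the result computed arithmetically as dirs[(idx + turn // 45) % 8], dropping the unreachable ValueError branch.
import Mathlib
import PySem

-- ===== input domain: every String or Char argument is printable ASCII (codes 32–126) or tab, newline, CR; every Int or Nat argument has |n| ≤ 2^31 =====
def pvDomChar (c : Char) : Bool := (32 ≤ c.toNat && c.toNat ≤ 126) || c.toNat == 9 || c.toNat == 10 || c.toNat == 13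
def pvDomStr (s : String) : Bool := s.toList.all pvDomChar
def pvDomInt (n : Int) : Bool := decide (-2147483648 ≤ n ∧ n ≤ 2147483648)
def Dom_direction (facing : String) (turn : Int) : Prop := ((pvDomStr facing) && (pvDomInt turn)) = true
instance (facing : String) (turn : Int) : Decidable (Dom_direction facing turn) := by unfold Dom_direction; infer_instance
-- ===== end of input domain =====

-- B replaces A's two while-loop normalizations and reverse value-search through the dict
-- by modular arithmetic over one ordered direction list (objective: simpler).

-- ===== PORT A =====
def pvCompass : PySem.Dict String Int :=
  PySem.Dict.ofList [("N", 0), ("NE", 45), ("E", 90), ("SE", 135),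
                     ("S", 180), ("SW", 225), ("W", 270), ("NW", 315)]

-- while new_turn < 0: new_turn += 360
def pvLiftNeg (n : Int) : Int :=
  if n < 0 then pvLiftNeg (n + 360) else n
termination_by (-n).toNat
decreasing_by omega

-- while new_turn >= 360: new_turn -= 360
def pvDropBig (n : Int) : Int :=
  if n ≥ 360 then pvDropBig (n - 360) else n
termination_by n.toNat
decreasing_by omega

def direction (facing : String) (turn : Int) : String :=
  match pvCompass.get? facing with
  | none => "Wrong direction: " ++ facing ++ "; NO Such Direction Exists"
  | some current_turn =>
    if -1080 > turn ∨ turn > 1080 ∨ ¬ (PySem.Int.mod turn 45 = 0) then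
      "Wrong turning degree: " ++ PySem.Int.toStr turn ++
        "; Degree must be between (-1080; 1080) and be multiple of 45"
    else
      let new_turn := pvDropBig (pvLiftNeg (current_turn + turn))
      match PySem.List.index? pvCompass.values new_turn with
      | none => PySem.Int.toStr new_turn ++ " is not possible result; no direction with such degree exists"
      | some i => (PySem.List.pyGet? pvCompass.keys (i : Int)).getD ""
        -- index from .index is always a valid position, so the pyGet? default is never used

-- ===== PORT B =====
def pvDirs : List String := ["N", "NE", "E", "SE", "S", "SW", "W", "NW"]

def direction_alt (facing : String) (turn : Int) : String :=
  match PySem.List.index? pvDirs facing with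
  | none => "Wrong direction: " ++ facing ++ "; NO Such Direction Exists"
  | some idx =>
    if -1080 > turn ∨ turn > 1080 ∨ ¬ (PySem.Int.mod turn 45 = 0) then
      "Wrong turning degree: " ++ PySem.Int.toStr turn ++
        "; Degree must be between (-1080; 1080) and be multiple of 45"
    else
      (PySem.List.pyGet? pvDirs
        (PySem.Int.mod ((idx : Int) + PySem.Int.floordiv turn 45) 8)).getD ""
        -- the index is in [0, 8), so the pyGet? default is never used

-- ===== PRECONDITION & SPEC =====
def Spec_direction (facing : String) (turn : Int) (out : String) : Prop := out = direction_alt facing turn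
instance (facing : String) (turn : Int) (out : String) : Decidable (Spec_direction facing turn out) := by unfold Spec_direction; infer_instance

-- ===== CLAIM (what is proved, stated in full; the proofs are below) =====
def Claim_equal_direction : Prop := ∀ (facing : String) (turn : Int), Dom_direction facing turn → Spec_direction facing turn (direction facing turn)

-- ===== LEMMAS AND PROOFS =====

theorem pvLiftNeg_spec (n : Int) : 0 ≤ pvLiftNeg n ∧ pvLiftNeg n % 360 = n % 360 := by
  induction n using pvLiftNeg.induct with
  | case1 n h ih =>
    rw [pvLiftNeg, if_pos h]
    exact ⟨ih.1, by omega⟩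
  | case2 n h =>
    rw [pvLiftNeg, if_neg h]
    exact ⟨by omega, rfl⟩

theorem pvDropBig_spec (n : Int) (h0 : 0 ≤ n) : pvDropBig n = n % 360 := by
  induction n using pvDropBig.induct with
  | case1 n h ih =>
    rw [pvDropBig, if_pos h, ih (by omega)]
    omega
  | case2 n h =>
    rw [pvDropBig, if_neg h]
    omega

theorem pvNormalize (n : Int) : pvDropBig (pvLiftNeg n) = n % 360 := by
  obtain ⟨h0, hm⟩ := pvLiftNeg_spec n
  rw [pvDropBig_spec _ h0, hm]

-- core agreement for a recognised facing: its compass degree is 45 * its list position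
theorem pvMain (idx : Nat) (hidx : idx < 8) (turn : Int)
    (h1 : -1080 ≤ turn) (h2 : turn ≤ 1080) (h3 : PySem.Int.mod turn 45 = 0) :
    (match PySem.List.index? pvCompass.values (pvDropBig (pvLiftNeg (45 * (idx : Int) + turn))) with
      | none => PySem.Int.toStr (pvDropBig (pvLiftNeg (45 * (idx : Int) + turn))) ++ " is not possible result; no direction with such degree exists"
      | some i => (PySem.List.pyGet? pvCompass.keys (i : Int)).getD "")
    = (PySem.List.pyGet? pvDirs
        (PySem.Int.mod ((idx : Int) + PySem.Int.floordiv turn 45) 8)).getD "" := by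
  rw [PySem.Int.mod_eq_emod_of_pos (by norm_num : (0:Int) < 45)] at h3
  rw [PySem.Int.floordiv_eq_ediv_of_pos (by norm_num : (0:Int) < 45)]
  rw [PySem.Int.mod_eq_emod_of_pos (by norm_num : (0:Int) < 8)]
  rw [pvNormalize]
  have hturn : turn = 45 * (turn / 45) := by omega
  set k : Int := turn / 45 with hk
  have hmod : (45 * (idx : Int) + turn) % 360 = 45 * (((idx : Int) + k) % 8) := by omega
  rw [hmod]
  have hm0 : 0 ≤ ((idx : Int) + k) % 8 := by omega
  have hm8 : ((idx : Int) + k) % 8 < 8 := by omega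
  set m : Int := ((idx : Int) + k) % 8 with hmdef
  clear_value m
  interval_cases m <;> decide

-- one recognised facing, both ports: dict degree is some (45*idx), list position is some idx
theorem pvCase (facing : String) (idx : Nat) (hidx : idx < 8) (turn : Int)
    (hA : pvCompass.get? facing = some (45 * (idx : Int)))
    (hB : PySem.List.index? pvDirs facing = some idx) :
    direction facing turn = direction_alt facing turn := by
  unfold direction direction_alt
  rw [hA, hB]
  dsimp only
  by_cases hg : -1080 > turn ∨ turn > 1080 ∨ ¬ (PySem.Int.mod turn 45 = 0)
  · rw [if_pos hg, if_pos hg]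
  · rw [if_neg hg, if_neg hg]
    push_neg at hg
    exact pvMain idx hidx turn hg.1 hg.2.1 hg.2.2

theorem pvKeys_eq : pvCompass.keys = pvDirs := by decide

-- ===== VERDICT (by name: the statement is the Claim_ definition above) =====
theorem direction_spec : Claim_equal_direction := by
  intro facing turn _
  unfold Spec_direction
  by_cases h : facing ∈ pvDirs
  · fin_cases h
    · exact pvCase "N" 0 (by norm_num) turn (by decide) (by decide)
    · exact pvCase "NE" 1 (by norm_num) turn (by decide) (by decide)
    · exact pvCase "E" 2 (by norm_num) turn (by decide) (by decide)
    · exact pvCase "SE" 3 (by norm_num) turn (by decide) (by decide)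
    · exact pvCase "S" 4 (by norm_num) turn (by decide) (by decide)
    · exact pvCase "SW" 5 (by norm_num) turn (by decide) (by decide)
    · exact pvCase "W" 6 (by norm_num) turn (by decide) (by decide)
    · exact pvCase "NW" 7 (by norm_num) turn (by decide) (by decide)
  · have hA : pvCompass.get? facing = none := by
      rw [PySem.Dict.get?_eq_none_iff_not_mem_keys, pvKeys_eq]
      exact h
    have hB : PySem.List.index? pvDirs facing = none :=
      (PySem.List.index?_eq_none_iff pvDirs facing).mpr h
    unfold direction direction_alt
    rw [hA, hB]
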